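-- pv_equiv track=rewrite | github.com/minizhao/LintCode_python | Python/The_Biggest_Score_On_The_Tree.py | dfs
-- ===== SOURCE A (Python) =====
-- def dfs(node,curr_cost,sum,tree,profit):
-- 	#是叶子节点
-- 	if node not in tree.keys() :
-- 		return sum+profit[node]-curr_cost
--
-- 	sum=sum+profit[node]-curr_cost
--
-- 	childs=tree[node]
--
-- 	sum_list=[]
-- 	for c,cost in childs:
-- 		sum_list.append(dfs(c,cost,sum,tree,profit))
-- 	return max(sum_list)
-- ===== SOURCE B (Python) =====
-- def dfs(node, curr_cost, sum, tree, profit):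
--     # Memoized bottom-up value: each node's best subtree value is computed once
--     # (dynamic programming), instead of re-walking shared subtrees per path;
--     # the path accumulators (sum, curr_cost) are factored out algebraically.
--     memo = {}
--
--     def best(n):
--         if n in memo:
--             return memo[n]
--         if n not in tree:
--             r = profit[n]
--         else:
--             r = profit[n] + max(best(c) - cost for c, cost in tree[n])
--         memo[n] = r
--         return r
--
--     return sum - curr_cost + best(node)
-- ===== Notes on version B (the rewrite author's own statement) =====
-- stated objective: alternative
-- what changed: Replaces A's naive per-path recursion (which re-walks shared subtrees once per path and threads (sum, curr_cost) accumulators) by a memoized per-node best-subtree-value function (dynamic programming), with the path accumulators factored out algebraically as sum - curr_cost + best(node).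
import Mathlib
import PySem

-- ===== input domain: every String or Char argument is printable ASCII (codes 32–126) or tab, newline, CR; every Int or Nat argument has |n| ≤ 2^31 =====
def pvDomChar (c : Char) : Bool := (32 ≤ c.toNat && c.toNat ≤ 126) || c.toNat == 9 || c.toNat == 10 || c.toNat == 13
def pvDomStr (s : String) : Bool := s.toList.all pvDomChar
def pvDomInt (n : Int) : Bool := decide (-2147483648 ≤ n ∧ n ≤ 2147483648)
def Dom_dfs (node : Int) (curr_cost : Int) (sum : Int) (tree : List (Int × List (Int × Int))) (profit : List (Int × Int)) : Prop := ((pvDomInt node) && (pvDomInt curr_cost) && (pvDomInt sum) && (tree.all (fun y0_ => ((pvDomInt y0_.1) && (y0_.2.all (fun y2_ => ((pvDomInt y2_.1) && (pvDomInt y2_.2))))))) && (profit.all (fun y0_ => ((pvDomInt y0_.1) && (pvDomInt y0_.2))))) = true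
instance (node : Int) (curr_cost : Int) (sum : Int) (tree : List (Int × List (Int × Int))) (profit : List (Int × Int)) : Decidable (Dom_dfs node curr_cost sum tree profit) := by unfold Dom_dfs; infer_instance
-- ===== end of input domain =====

-- B replaces A's per-path naive recursion by a memoized per-node value function
-- (dynamic programming): each node's best subtree value is computed once.

-- ===== PORT A =====
-- first-match association-list lookup = Python dict lookup (keys are dict keys, hence unique)
def lkT (tree : List (Int × List (Int × Int))) (k : Int) : Option (List (Int × Int)) :=
  (tree.find? (fun p => p.1 == k)).map (·.2)

-- profit[k]; Python raises KeyError when k is missing — those inputs are excluded by Pre_dfs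
def lkP (profit : List (Int × Int)) (k : Int) : Int :=
  ((profit.find? (fun p => p.1 == k)).map (·.2)).getD 0

-- literal fueled transliteration of A's recursion (fuel only guards termination;
-- Pre_dfs proves tree.length + 1 fuel is never exhausted); max([]) raises in
-- Python — excluded by Pre_dfs, the port returns the .getD default there
def dfsA (tree : List (Int × List (Int × Int))) (profit : List (Int × Int)) :
    Nat → Int → Int → Int → Int
  | 0, _, _, _ => 0
  | fuel + 1, node, curr_cost, s =>
    match lkT tree node with
    | none => s + lkP profit node - curr_cost
    | some childs =>
      let s2 := s + lkP profit node - curr_cost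
      let sum_list := childs.map (fun p => dfsA tree profit fuel p.1 p.2 s2)
      (PySem.List.max? sum_list (fun y => y)).getD 0

def dfs (node : Int) (curr_cost : Int) (sum : Int) (tree : List (Int × List (Int × Int))) (profit : List (Int × Int)) : Int :=
  dfsA tree profit (tree.length + 1) node curr_cost sum

-- ===== PORT B =====
-- best(n) with the memo dict threaded through (state-passing); fueled like A's port
mutual
  def fB (tree : List (Int × List (Int × Int))) (profit : List (Int × Int)) :
      Nat → Int → List (Int × Int) → Int × List (Int × Int)
    | 0, _, memo => (0, memo)
    | fuel + 1, n, memo =>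
      match (memo.find? (fun p => p.1 == n)).map (·.2) with
      | some v => (v, memo)
      | none =>
        match lkT tree n with
        | none =>
          let r := lkP profit n
          (r, (n, r) :: memo)
        | some cs =>
          let vm := fBList tree profit fuel cs memo
          let r := lkP profit n + (PySem.List.max? vm.1 (fun y => y)).getD 0
          (r, (n, r) :: vm.2)
  termination_by fuel _ _ => (fuel, 0)

  -- the generator 'best(c) - cost for c, cost in tree[n]', left to right
  def fBList (tree : List (Int × List (Int × Int))) (profit : List (Int × Int)) :
      Nat → List (Int × Int) → List (Int × Int) → List Int × List (Int × Int)
    | _, [], memo => ([], memo)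
    | fuel, p :: rest, memo =>
      let vm := fB tree profit fuel p.1 memo
      let tl := fBList tree profit fuel rest vm.2
      ((vm.1 - p.2) :: tl.1, tl.2)
  termination_by fuel cs _ => (fuel, cs.length + 1)
end

def dfs_alt (node : Int) (curr_cost : Int) (sum : Int) (tree : List (Int × List (Int × Int))) (profit : List (Int × Int)) : Int :=
  sum - curr_cost + (fB tree profit (tree.length + 1) node []).1

-- ===== PRECONDITION & SPEC =====
-- node ids reachable from a set S in one step through the adjacency list
def stepKeys (tree : List (Int × List (Int × Int))) (S : List Int) : List Int :=
  S.flatMap (fun n => match lkT tree n with | some cs => cs.map (·.1) | none => [])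

-- node ids reachable in exactly k steps
def ek (tree : List (Int × List (Int × Int))) (S : List Int) : Nat → List Int
  | 0 => S
  | k + 1 => ek tree (stepKeys tree S) k

-- node ids reachable in at most k steps
def reachAux (tree : List (Int × List (Int × Int))) (S : List Int) : Nat → List Int
  | 0 => S
  | k + 1 => S ++ reachAux tree (stepKeys tree S) k

-- Pre_dfs = exactly the inputs on which A returns: the part of the graph reachable
-- from node is acyclic (else A recurses forever), every reachable node has a profit
-- entry (else KeyError), and every reachable internal node has a nonempty child
-- list (else ValueError from max([])).
def Pre_dfs (node : Int) (curr_cost : Int) (sum : Int) (tree : List (Int × List (Int × Int))) (profit : List (Int × Int)) : Prop :=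
  ek tree [node] (tree.length + 1) = [] ∧
  (∀ m ∈ reachAux tree [node] tree.length, (profit.find? (fun p => p.1 == m)).isSome) ∧
  (∀ m ∈ reachAux tree [node] tree.length, ∀ cs, lkT tree m = some cs → cs ≠ [])

instance (node : Int) (curr_cost : Int) (sum : Int) (tree : List (Int × List (Int × Int))) (profit : List (Int × Int)) : Decidable (Pre_dfs node curr_cost sum tree profit) := by
  unfold Pre_dfs; infer_instance

def pvWitness_dfs : Int × Int × Int × (List (Int × List (Int × Int))) × (List (Int × Int)) :=
  (0, 1, 2, [(0, [(1, 2), (2, 3)]), (1, [(3, 1)])], [(0, 5), (1, 7), (2, 4), (3, 9)])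

def Spec_dfs (node : Int) (curr_cost : Int) (sum : Int) (tree : List (Int × List (Int × Int))) (profit : List (Int × Int)) (out : Int) : Prop := out = dfs_alt node curr_cost sum tree profit
instance (node : Int) (curr_cost : Int) (sum : Int) (tree : List (Int × List (Int × Int))) (profit : List (Int × Int)) (out : Int) : Decidable (Spec_dfs node curr_cost sum tree profit out) := by unfold Spec_dfs; infer_instance

-- ===== CLAIM (what is proved, stated in full; the proofs are below) =====
def Claim_equal_dfs : Prop := ∀ (node : Int) (curr_cost : Int) (sum : Int) (tree : List (Int × List (Int × Int))) (profit : List (Int × Int)), Dom_dfs node curr_cost sum tree profit → Pre_dfs node curr_cost sum tree profit → Spec_dfs node curr_cost sum tree profit (dfs node curr_cost sum tree profit)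

-- ===== LEMMAS AND PROOFS =====

theorem stepKeys_mono {tree : List (Int × List (Int × Int))} {S T : List Int}
    (h : ∀ x ∈ S, x ∈ T) : ∀ x ∈ stepKeys tree S, x ∈ stepKeys tree T := by
  intro x hx
  simp only [stepKeys, List.mem_flatMap] at hx ⊢
  obtain ⟨n, hn, hm⟩ := hx
  exact ⟨n, h n hn, hm⟩

theorem ek_mono {tree : List (Int × List (Int × Int))} :
    ∀ (k : Nat) {S T : List Int}, (∀ x ∈ S, x ∈ T) → ∀ x ∈ ek tree S k, x ∈ ek tree T k := by
  intro k
  induction k with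
  | zero => intro S T h x hx; simpa [ek] using h x (by simpa [ek] using hx)
  | succ k ih =>
    intro S T h x hx
    simp only [ek] at hx ⊢
    exact ih (stepKeys_mono h) x hx

theorem ek_succ_eq_step {tree : List (Int × List (Int × Int))} :
    ∀ (k : Nat) (S : List Int), ek tree S (k + 1) = stepKeys tree (ek tree S k) := by
  intro k
  induction k with
  | zero => intro S; rfl
  | succ k ih => intro S; simp only [ek] at *; exact ih (stepKeys tree S)

theorem mem_stepKeys_child {tree : List (Int × List (Int × Int))} {n : Int} {cs : List (Int × Int)}
    (h : lkT tree n = some cs) {p : Int × Int} (hp : p ∈ cs) : p.1 ∈ stepKeys tree [n] := by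
  simp only [stepKeys, List.mem_flatMap]
  exact ⟨n, by simp, by rw [h]; exact List.mem_map_of_mem hp⟩

theorem mem_reachAux_of_ek {tree : List (Int × List (Int × Int))} :
    ∀ (k d : Nat) (S : List Int), d ≤ k → ∀ x ∈ ek tree S d, x ∈ reachAux tree S k := by
  intro k
  induction k with
  | zero =>
    intro d S hd x hx
    interval_cases d
    simpa [reachAux] using hx
  | succ k ih =>
    intro d S hd x hx
    match d with
    | 0 => simp only [reachAux, List.mem_append]; left; simpa [ek] using hx
    | d + 1 =>
      simp only [reachAux, List.mem_append]; right
      exact ih d (stepKeys tree S) (by omega) x (by simpa [ek] using hx)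

theorem ek_of_mem_reachAux {tree : List (Int × List (Int × Int))} :
    ∀ (k : Nat) (S : List Int), ∀ x ∈ reachAux tree S k, ∃ d ≤ k, x ∈ ek tree S d := by
  intro k
  induction k with
  | zero => intro S x hx; exact ⟨0, le_refl _, by simpa [reachAux, ek] using hx⟩
  | succ k ih =>
    intro S x hx
    simp only [reachAux, List.mem_append] at hx
    rcases hx with hx | hx
    · exact ⟨0, by omega, by simpa [ek] using hx⟩
    · obtain ⟨d, hd, hm⟩ := ih (stepKeys tree S) x hx
      exact ⟨d + 1, by omega, by simpa [ek] using hm⟩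

-- Python max(l) shifted by a constant
theorem max?_map_add (a : Int) :
    ∀ (l : List Int), PySem.List.max? (l.map (fun x => a + x)) (fun y => y) =
      (PySem.List.max? l (fun y => y)).map (fun x => a + x) := by
  intro l
  match l with
  | [] => simp [PySem.List.max?]
  | x :: t =>
    rw [List.map_cons, PySem.List.max?_id_cons, PySem.List.max?_id_cons]
    simp only [Option.map_some]
    congr 1
    induction t generalizing x with
    | nil => simp
    | cons y t ih =>
      simp only [List.map_cons, List.foldl_cons]
      have : max (a + x) (a + y) = a + max x y := (max_add_add_left a x y).symm ▸ rfl
      rw [this]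
      exact ih (max x y)

-- the canonical per-node value: A's own recursion at full fuel from a zero accumulator
def canonV (tree : List (Int × List (Int × Int))) (profit : List (Int × Int)) (n : Int) : Int :=
  dfsA tree profit (tree.length + 1) n 0 0

theorem dfsA_succ (tree : List (Int × List (Int × Int))) (profit : List (Int × Int))
    (fuel : Nat) (n cost acc : Int) :
    dfsA tree profit (fuel + 1) n cost acc =
      match lkT tree n with
      | none => acc + lkP profit n - cost
      | some childs =>
        (PySem.List.max?
          (childs.map (fun p => dfsA tree profit fuel p.1 p.2 (acc + lkP profit n - cost)))
          (fun y => y)).getD 0 := by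
  rw [dfsA]

theorem fB_succ (tree : List (Int × List (Int × Int))) (profit : List (Int × Int))
    (fuel : Nat) (n : Int) (memo : List (Int × Int)) :
    fB tree profit (fuel + 1) n memo =
      match (memo.find? (fun p => p.1 == n)).map (·.2) with
      | some v => (v, memo)
      | none =>
        match lkT tree n with
        | none => (lkP profit n, (n, lkP profit n) :: memo)
        | some cs =>
          let vm := fBList tree profit fuel cs memo
          (lkP profit n + (PySem.List.max? vm.1 (fun y => y)).getD 0,
           (n, lkP profit n + (PySem.List.max? vm.1 (fun y => y)).getD 0) :: vm.2) := by
  rw [fB]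

theorem fBList_nil (tree : List (Int × List (Int × Int))) (profit : List (Int × Int))
    (fuel : Nat) (memo : List (Int × Int)) :
    fBList tree profit fuel [] memo = ([], memo) := by
  rw [fBList]

theorem fBList_cons (tree : List (Int × List (Int × Int))) (profit : List (Int × Int))
    (fuel : Nat) (p : Int × Int) (rest : List (Int × Int)) (memo : List (Int × Int)) :
    fBList tree profit fuel (p :: rest) memo =
      (((fB tree profit fuel p.1 memo).1 - p.2) ::
         (fBList tree profit fuel rest (fB tree profit fuel p.1 memo).2).1,
       (fBList tree profit fuel rest (fB tree profit fuel p.1 memo).2).2) := by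
  rw [fBList]

theorem dfsA_succ_none (tree : List (Int × List (Int × Int))) (profit : List (Int × Int))
    (fuel : Nat) (n cost acc : Int) (h : lkT tree n = none) :
    dfsA tree profit (fuel + 1) n cost acc = acc + lkP profit n - cost := by
  rw [dfsA_succ, h]

theorem dfsA_succ_some (tree : List (Int × List (Int × Int))) (profit : List (Int × Int))
    (fuel : Nat) (n cost acc : Int) {cs : List (Int × Int)} (h : lkT tree n = some cs) :
    dfsA tree profit (fuel + 1) n cost acc =
      (PySem.List.max?
        (cs.map (fun p => dfsA tree profit fuel p.1 p.2 (acc + lkP profit n - cost)))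
        (fun y => y)).getD 0 := by
  rw [dfsA_succ, h]

theorem fB_succ_hit (tree : List (Int × List (Int × Int))) (profit : List (Int × Int))
    (fuel : Nat) (n : Int) (memo : List (Int × Int)) {v : Int}
    (h : (memo.find? (fun p => p.1 == n)).map (·.2) = some v) :
    fB tree profit (fuel + 1) n memo = (v, memo) := by
  rw [fB_succ, h]

theorem fB_succ_leaf (tree : List (Int × List (Int × Int))) (profit : List (Int × Int))
    (fuel : Nat) (n : Int) (memo : List (Int × Int))
    (h : (memo.find? (fun p => p.1 == n)).map (·.2) = none) (hlk : lkT tree n = none) :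
    fB tree profit (fuel + 1) n memo = (lkP profit n, (n, lkP profit n) :: memo) := by
  rw [fB_succ, h, hlk]

theorem fB_succ_node (tree : List (Int × List (Int × Int))) (profit : List (Int × Int))
    (fuel : Nat) (n : Int) (memo : List (Int × Int))
    (h : (memo.find? (fun p => p.1 == n)).map (·.2) = none) {cs : List (Int × Int)}
    (hlk : lkT tree n = some cs) :
    fB tree profit (fuel + 1) n memo =
      (lkP profit n + (PySem.List.max? (fBList tree profit fuel cs memo).1 (fun y => y)).getD 0,
       (n, lkP profit n + (PySem.List.max? (fBList tree profit fuel cs memo).1 (fun y => y)).getD 0)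
         :: (fBList tree profit fuel cs memo).2) := by
  rw [fB_succ, h, hlk]

theorem maxShiftMapGetD {α : Type} (a : Int) (g : α → Int) (cs : List α) (h : cs ≠ []) :
    (PySem.List.max? (cs.map (fun p => a + g p)) (fun y => y)).getD 0 =
      a + (PySem.List.max? (cs.map g) (fun y => y)).getD 0 := by
  have h1 : cs.map (fun p => a + g p) = (cs.map g).map (fun x => a + x) := by
    simp [List.map_map, Function.comp_def]
  rw [h1, max?_map_add]
  match cs with
  | [] => exact absurd rfl h
  | x :: t =>
    rw [List.map_cons, PySem.List.max?_id_cons]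
    simp

theorem canonV_leaf (tree : List (Int × List (Int × Int))) (profit : List (Int × Int))
    (n : Int) (hlk : lkT tree n = none) : canonV tree profit n = lkP profit n := by
  unfold canonV
  rw [dfsA_succ_none tree profit tree.length n 0 0 hlk]
  ring

-- A's recursion computes acc - cost + canonV n, for any sufficient fuel
theorem masterA (tree : List (Int × List (Int × Int))) (profit : List (Int × Int))
    (R : List Int)
    (Hne : ∀ m ∈ R, ∀ cs, lkT tree m = some cs → cs ≠ [])
    (Hcl : ∀ m ∈ R, ∀ cs, lkT tree m = some cs → ∀ p ∈ cs, p.1 ∈ R) :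
    ∀ (k : Nat), ∀ n ∈ R, ek tree [n] k = [] → k ≤ tree.length + 1 →
      ∀ fuel, k ≤ fuel → ∀ cost acc,
        dfsA tree profit fuel n cost acc = acc - cost + canonV tree profit n := by
  intro k
  induction k with
  | zero => intro n _ hek _ _ _ _ _; simp [ek] at hek
  | succ k ih =>
    intro n hn hek hk fuel hfuel cost acc
    obtain ⟨f, rfl⟩ : ∃ f, fuel = f + 1 := ⟨fuel - 1, by omega⟩
    simp only [ek] at hek
    cases hlk : lkT tree n with
    | none =>
      rw [dfsA_succ_none tree profit f n cost acc hlk, canonV_leaf tree profit n hlk]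
      ring
    | some cs =>
      have hcs_ne := Hne n hn cs hlk
      have hchild : ∀ p ∈ cs, p.1 ∈ R ∧ ek tree [p.1] k = [] := by
        intro p hp
        refine ⟨Hcl n hn cs hlk p hp, ?_⟩
        have hsub : ∀ x ∈ ek tree [p.1] k, x ∈ ek tree (stepKeys tree [n]) k := by
          refine ek_mono k ?_
          intro x hx
          have hx' : x = p.1 := by simpa using hx
          exact hx' ▸ mem_stepKeys_child hlk hp
        rw [List.eq_nil_iff_forall_not_mem]
        intro x hx
        have := hsub x hx
        rw [hek] at this
        exact List.not_mem_nil this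
      have hC : canonV tree profit n =
          lkP profit n +
            (PySem.List.max? (cs.map (fun p => canonV tree profit p.1 - p.2)) (fun y => y)).getD 0 := by
        unfold canonV
        rw [dfsA_succ_some tree profit tree.length n 0 0 hlk]
        have hmap : cs.map (fun p => dfsA tree profit tree.length p.1 p.2 (0 + lkP profit n - 0))
            = cs.map (fun p => lkP profit n + (canonV tree profit p.1 - p.2)) := by
          apply List.map_congr_left
          intro p hp
          rw [ih p.1 (hchild p hp).1 (hchild p hp).2 (by omega) tree.length (by omega) p.2
            (0 + lkP profit n - 0)]
          ring
        rw [hmap, maxShiftMapGetD (lkP profit n) (fun p => canonV tree profit p.1 - p.2) cs hcs_ne]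
        rfl
      rw [dfsA_succ_some tree profit f n cost acc hlk]
      have hmap : cs.map (fun p => dfsA tree profit f p.1 p.2 (acc + lkP profit n - cost))
          = cs.map (fun p => (acc + lkP profit n - cost) + (canonV tree profit p.1 - p.2)) := by
        apply List.map_congr_left
        intro p hp
        rw [ih p.1 (hchild p hp).1 (hchild p hp).2 (by omega) f (by omega) p.2
          (acc + lkP profit n - cost)]
        ring
      rw [hmap,
        maxShiftMapGetD (acc + lkP profit n - cost) (fun p => canonV tree profit p.1 - p.2) cs hcs_ne,
        hC]
      ring

-- unfolding of canonV at an internal node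
theorem canonV_unfold (tree : List (Int × List (Int × Int))) (profit : List (Int × Int))
    (R : List Int)
    (Hne : ∀ m ∈ R, ∀ cs, lkT tree m = some cs → cs ≠ [])
    (Hcl : ∀ m ∈ R, ∀ cs, lkT tree m = some cs → ∀ p ∈ cs, p.1 ∈ R)
    (k : Nat) (n : Int) (hn : n ∈ R) (hek : ek tree [n] k = []) (hk : k ≤ tree.length + 1)
    {cs : List (Int × Int)} (hcs : lkT tree n = some cs) :
    canonV tree profit n =
      lkP profit n +
        (PySem.List.max? (cs.map (fun p => canonV tree profit p.1 - p.2)) (fun y => y)).getD 0 := by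
  match k with
  | 0 => simp [ek] at hek
  | k + 1 =>
    simp only [ek] at hek
    have hcs_ne := Hne n hn cs hcs
    have hchild : ∀ p ∈ cs, p.1 ∈ R ∧ ek tree [p.1] k = [] := by
      intro p hp
      refine ⟨Hcl n hn cs hcs p hp, ?_⟩
      have hsub : ∀ x ∈ ek tree [p.1] k, x ∈ ek tree (stepKeys tree [n]) k := by
        refine ek_mono k ?_
        intro x hx
        have hx' : x = p.1 := by simpa using hx
        exact hx' ▸ mem_stepKeys_child hcs hp
      rw [List.eq_nil_iff_forall_not_mem]
      intro x hx
      have := hsub x hx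
      rw [hek] at this
      exact List.not_mem_nil this
    unfold canonV
    rw [dfsA_succ_some tree profit tree.length n 0 0 hcs]
    have hmap : cs.map (fun p => dfsA tree profit tree.length p.1 p.2 (0 + lkP profit n - 0))
        = cs.map (fun p => lkP profit n + (canonV tree profit p.1 - p.2)) := by
      apply List.map_congr_left
      intro p hp
      rw [masterA tree profit R Hne Hcl k p.1 (hchild p hp).1 (hchild p hp).2 (by omega)
        tree.length (by omega) p.2 (0 + lkP profit n - 0)]
      ring
    rw [hmap, maxShiftMapGetD (lkP profit n) (fun p => canonV tree profit p.1 - p.2) cs hcs_ne]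
    rfl

-- soundness of the memo: every stored value is the canonical value
def memoOK (tree : List (Int × List (Int × Int))) (profit : List (Int × Int)) (memo : List (Int × Int)) : Prop :=
  ∀ p ∈ memo, p.2 = canonV tree profit p.1

theorem masterB (tree : List (Int × List (Int × Int))) (profit : List (Int × Int))
    (R : List Int)
    (Hne : ∀ m ∈ R, ∀ cs, lkT tree m = some cs → cs ≠ [])
    (Hcl : ∀ m ∈ R, ∀ cs, lkT tree m = some cs → ∀ p ∈ cs, p.1 ∈ R) :
    ∀ (k : Nat), ∀ n ∈ R, ek tree [n] k = [] → k ≤ tree.length + 1 →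
      ∀ fuel, k ≤ fuel → ∀ memo, memoOK tree profit memo →
        (fB tree profit fuel n memo).1 = canonV tree profit n ∧
        memoOK tree profit (fB tree profit fuel n memo).2 := by
  intro k
  induction k with
  | zero => intro n _ hek _ _ _ _ _; simp [ek] at hek
  | succ k ih =>
    intro n hn hek0 hk fuel hfuel memo hmemo
    obtain ⟨f, rfl⟩ : ∃ f, fuel = f + 1 := ⟨fuel - 1, by omega⟩
    have hek : ek tree (stepKeys tree [n]) k = [] := by simpa only [ek] using hek0
    cases hhit : (memo.find? (fun p => p.1 == n)).map (·.2) with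
    | some v =>
      have hv : v = canonV tree profit n := by
        cases hf : memo.find? (fun q => q.1 == n) with
        | none => rw [hf] at hhit; simp at hhit
        | some p =>
          have hpm : p ∈ memo := List.mem_of_find?_eq_some hf
          have hkey : p.1 = n := by
            have := List.find?_some hf
            simpa using this
          have hv2 : v = p.2 := by rw [hf] at hhit; simpa using hhit.symm
          rw [hv2, hmemo p hpm, hkey]
      rw [fB_succ_hit tree profit f n memo hhit]
      exact ⟨hv, hmemo⟩
    | none =>
      cases hlk : lkT tree n with
      | none =>
        rw [fB_succ_leaf tree profit f n memo hhit hlk]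
        refine ⟨(canonV_leaf tree profit n hlk).symm, ?_⟩
        intro p hp
        rcases List.mem_cons.mp hp with hp | hp
        · rw [hp]
          simpa using (canonV_leaf tree profit n hlk).symm
        · exact hmemo p hp
      | some cs =>
        have hcs_ne := Hne n hn cs hlk
        have hchild : ∀ p ∈ cs, p.1 ∈ R ∧ ek tree [p.1] k = [] := by
          intro p hp
          refine ⟨Hcl n hn cs hlk p hp, ?_⟩
          have hsub : ∀ x ∈ ek tree [p.1] k, x ∈ ek tree (stepKeys tree [n]) k := by
            refine ek_mono k ?_
            intro x hx
            have hx' : x = p.1 := by simpa using hx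
            exact hx' ▸ mem_stepKeys_child hlk hp
          rw [List.eq_nil_iff_forall_not_mem]
          intro x hx
          have := hsub x hx
          rw [hek] at this
          exact List.not_mem_nil this
        have hlist : ∀ (l : List (Int × Int)), (∀ p ∈ l, p.1 ∈ R ∧ ek tree [p.1] k = []) →
            ∀ memo', memoOK tree profit memo' →
              (fBList tree profit f l memo').1 = l.map (fun p => canonV tree profit p.1 - p.2) ∧
              memoOK tree profit (fBList tree profit f l memo').2 := by
          intro l
          induction l with
          | nil => intro _ memo' hOK; exact ⟨by simp [fBList_nil], by rw [fBList_nil]; exact hOK⟩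
          | cons q rest ihl =>
            intro hl memo' hOK
            have h1 := ih q.1 (hl q (List.mem_cons_self)).1 (hl q (List.mem_cons_self)).2
              (by omega) f (by omega) memo' hOK
            have h2 := ihl (fun p hp => hl p (List.mem_cons_of_mem q hp)) (fB tree profit f q.1 memo').2 h1.2
            refine ⟨?_, ?_⟩
            · rw [fBList_cons, List.map_cons, h1.1, h2.1]
            · rw [fBList_cons]
              exact h2.2
        obtain ⟨hvals, hOK'⟩ := hlist cs hchild memo hmemo
        have hr : lkP profit n +
            (PySem.List.max? (fBList tree profit f cs memo).1 (fun y => y)).getD 0 =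
            canonV tree profit n := by
          rw [hvals]
          exact (canonV_unfold tree profit R Hne Hcl (k + 1) n hn hek0 hk hlk).symm
        rw [fB_succ_node tree profit f n memo hhit hlk]
        refine ⟨hr, ?_⟩
        intro p hp
        rcases List.mem_cons.mp hp with hp | hp
        · rw [hp]; simpa using hr
        · exact hOK' p hp

-- ===== VERDICT (by name: the statement is the Claim_ definition above) =====
theorem dfs_spec : Claim_equal_dfs := by
  intro node curr_cost s tree profit _hdom hpre
  obtain ⟨hacy, _hprof, hne⟩ := hpre
  unfold Spec_dfs dfs dfs_alt
  set R := reachAux tree [node] tree.length with hR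
  have hclosed : ∀ m ∈ R, ∀ cs, lkT tree m = some cs → ∀ p ∈ cs, p.1 ∈ R := by
    intro m hm cs hcs p hp
    obtain ⟨d, hd, hmd⟩ := ek_of_mem_reachAux tree.length [node] m hm
    have hc1 : p.1 ∈ ek tree [node] (d + 1) := by
      rw [ek_succ_eq_step]
      refine stepKeys_mono ?_ p.1 (mem_stepKeys_child hcs hp)
      intro x hx
      have : x = m := by simpa using hx
      exact this ▸ hmd
    by_cases hdl : d + 1 ≤ tree.length
    · exact mem_reachAux_of_ek tree.length (d + 1) [node] hdl p.1 hc1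
    · exfalso
      have : d + 1 = tree.length + 1 := by omega
      rw [this, hacy] at hc1
      exact (List.not_mem_nil) hc1
  have hnode : node ∈ R := by
    exact mem_reachAux_of_ek tree.length 0 [node] (Nat.zero_le _) node (by simp [ek])
  have hA := masterA tree profit R hne hclosed (tree.length + 1) node hnode hacy
      (le_refl _) (tree.length + 1) (le_refl _) curr_cost s
  have hB := masterB tree profit R hne hclosed (tree.length + 1) node hnode hacy
      (le_refl _) (tree.length + 1) (le_refl _) [] (by intro p hp; cases hp)
  rw [hA, hB.1]
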